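-- pv_equiv track=rewrite | github.com/mafycek/transfer_entropy | src/cli_helpers.py | process_CLI_arguments
-- ===== SOURCE A (Python) =====
-- def process_CLI_arguments(arguments, separator=(",", "'", "/", "|"), separator_of_groups=(";", ":", "~")):
--     processed_arguments = []
--
--     new_group = [[]]
--     new_set = new_group[0]
--     for item in arguments:
--
--         if item in separator_of_groups:
--             processed_arguments.append(new_group)
--             new_group = [[]]
--             new_set = new_group[0]
--         elif item in separator:
--             new_group.append([])
--             new_set = new_group[-1]
--         else:
--             new_set.append(int(item))
--
--     processed_arguments.append(new_group)
--     return processed_arguments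
-- ===== SOURCE B (Python) =====
-- def split_on(seq, seps):
--     """Split seq on every item in seps, keeping empty parts."""
--     parts = []
--     cur = []
--     for x in seq:
--         if x in seps:
--             parts.append(cur)
--             cur = []
--         else:
--             cur.append(x)
--     parts.append(cur)
--     return parts
--
--
-- def process_CLI_arguments(arguments, separator=(",", "'", "/", "|"), separator_of_groups=(";", ":", "~")):
--     return [
--         [[int(x) for x in leaf] for leaf in split_on(segment, separator)]
--         for segment in split_on(arguments, separator_of_groups)
--     ]
-- ===== Notes on version B (the rewrite author's own statement) =====
-- stated objective: simpler
-- what changed: Replaces A's single stateful loop (mutating the last subset of the current group) by a reusable split_on helper applied twice plus comprehensions: split the arguments into group segments, split each segment into subsets, convert leaves with int.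
import Mathlib
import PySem

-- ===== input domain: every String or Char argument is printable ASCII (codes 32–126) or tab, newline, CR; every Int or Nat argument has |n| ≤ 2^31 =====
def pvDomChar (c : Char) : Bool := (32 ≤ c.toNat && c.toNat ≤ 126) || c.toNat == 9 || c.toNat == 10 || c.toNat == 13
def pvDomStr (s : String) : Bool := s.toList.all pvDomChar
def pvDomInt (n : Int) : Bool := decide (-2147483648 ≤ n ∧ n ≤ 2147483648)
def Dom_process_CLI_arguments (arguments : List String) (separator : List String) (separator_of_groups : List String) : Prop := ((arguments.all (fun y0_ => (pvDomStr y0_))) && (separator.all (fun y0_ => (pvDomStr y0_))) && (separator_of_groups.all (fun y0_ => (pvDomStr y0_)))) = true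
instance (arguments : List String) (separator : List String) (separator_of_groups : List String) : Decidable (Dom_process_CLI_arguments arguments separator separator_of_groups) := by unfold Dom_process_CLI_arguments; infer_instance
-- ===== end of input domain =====

-- B replaces A's single stateful loop by a reusable split_on helper applied twice plus maps (simpler decomposition; same cost).


-- int(item); Pre_ guarantees the parse succeeds, so the default 0 is never used.
def pvToInt (s : String) : Int := (PySem.Int.ofStr? s).getD 0

-- ===== PORT A =====
-- A's loop state: (processed_arguments, new_group); new_set is always the LAST element of
-- new_group (the initial aliasing and every re-binding keep it so), so 'new_set.append(v)'
-- is ported as replacing the last element of new_group.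
def pvStepA (separator separator_of_groups : List String)
    (st : List (List (List Int)) × List (List Int)) (item : String) :
    List (List (List Int)) × List (List Int) :=
  if item ∈ separator_of_groups then
    (st.1 ++ [st.2], [[]])
  else if item ∈ separator then
    (st.1, st.2 ++ [[]])
  else
    (st.1, st.2.dropLast ++ [st.2.getLastD [] ++ [pvToInt item]])

def process_CLI_arguments (arguments : List String) (separator : List String) (separator_of_groups : List String) : List (List (List Int)) :=
  let st := arguments.foldl (pvStepA separator separator_of_groups) ([], [[]])
  st.1 ++ [st.2]

-- ===== PORT B =====
-- split_on from Source B: one pass, collecting parts on each separator, keeping empty parts.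
def pvSplitOn (seq seps : List String) : List (List String) :=
  let st := seq.foldl
    (fun (st : List (List String) × List String) x =>
      if x ∈ seps then (st.1 ++ [st.2], []) else (st.1, st.2 ++ [x]))
    ([], [])
  st.1 ++ [st.2]

def process_CLI_arguments_alt (arguments : List String) (separator : List String) (separator_of_groups : List String) : List (List (List Int)) :=
  (pvSplitOn arguments separator_of_groups).map
    (fun segment => (pvSplitOn segment separator).map (fun leaf => leaf.map pvToInt))

-- ===== PRECONDITION & SPEC =====
-- Pre_ excludes exactly the inputs where A raises ValueError: some item that is neither a
-- group separator nor a subset separator fails int().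
def Pre_process_CLI_arguments (arguments : List String) (separator : List String) (separator_of_groups : List String) : Prop :=
  ∀ item ∈ arguments, item ∈ separator_of_groups ∨ item ∈ separator ∨ (PySem.Int.ofStr? item).isSome = true
instance (arguments : List String) (separator : List String) (separator_of_groups : List String) : Decidable (Pre_process_CLI_arguments arguments separator separator_of_groups) := by unfold Pre_process_CLI_arguments; infer_instance

def pvWitness_process_CLI_arguments : List String × List String × List String :=
  (["1", ",", "2", ";", ";", "3", ","], [","], [";"])

def Spec_process_CLI_arguments (arguments : List String) (separator : List String) (separator_of_groups : List String) (out : List (List (List Int))) : Prop := out = process_CLI_arguments_alt arguments separator separator_of_groups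
instance (arguments : List String) (separator : List String) (separator_of_groups : List String) (out : List (List (List Int))) : Decidable (Spec_process_CLI_arguments arguments separator separator_of_groups out) := by unfold Spec_process_CLI_arguments; infer_instance

-- ===== CLAIM (what is proved, stated in full; the proofs are below) =====
def Claim_equal_process_CLI_arguments : Prop := ∀ (arguments : List String) (separator : List String) (separator_of_groups : List String), Dom_process_CLI_arguments arguments separator separator_of_groups → Pre_process_CLI_arguments arguments separator separator_of_groups → Spec_process_CLI_arguments arguments separator separator_of_groups (process_CLI_arguments arguments separator separator_of_groups)

-- ===== LEMMAS AND PROOFS =====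

-- Recursive reference version of split_on (proof-only).
def pvConsHead (x : String) : List (List String) → List (List String)
  | [] => [[x]]
  | h :: t => (x :: h) :: t

def pvSplitRec (seps : List String) : List String → List (List String)
  | [] => [[]]
  | x :: xs => if x ∈ seps then [] :: pvSplitRec seps xs else pvConsHead x (pvSplitRec seps xs)

lemma pvSplitRec_ne_nil (seps : List String) (l : List String) : pvSplitRec seps l ≠ [] := by
  cases l with
  | nil => simp [pvSplitRec]
  | cons x xs =>
    simp only [pvSplitRec]
    split
    · simp
    · cases h : pvSplitRec seps xs with
      | nil => simp [pvConsHead]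
      | cons a t => simp [pvConsHead]

-- prepend cur onto the head part
def pvGlueS (cur : List String) : List (List String) → List (List String)
  | [] => [cur]
  | h :: t => (cur ++ h) :: t

lemma pvSplitOn_fold (seps : List String) (seq : List String) :
    ∀ (parts : List (List String)) (cur : List String),
      (seq.foldl (fun (st : List (List String) × List String) x =>
          if x ∈ seps then (st.1 ++ [st.2], []) else (st.1, st.2 ++ [x])) (parts, cur)).1
        ++ [(seq.foldl (fun (st : List (List String) × List String) x =>
          if x ∈ seps then (st.1 ++ [st.2], []) else (st.1, st.2 ++ [x])) (parts, cur)).2]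
      = parts ++ pvGlueS cur (pvSplitRec seps seq) := by
  induction seq with
  | nil => intro parts cur; simp [pvSplitRec, pvGlueS]
  | cons x xs ih =>
    intro parts cur
    simp only [List.foldl_cons, pvSplitRec]
    by_cases hx : x ∈ seps
    · simp only [hx, if_pos]
      rw [ih]
      cases h : pvSplitRec seps xs with
      | nil => exact absurd h (pvSplitRec_ne_nil seps xs)
      | cons a t => simp [pvGlueS]
    · simp only [hx, if_neg, not_false_iff]
      rw [ih]
      cases h : pvSplitRec seps xs with
      | nil => exact absurd h (pvSplitRec_ne_nil seps xs)
      | cons a t => simp [pvGlueS, pvConsHead]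

lemma pvSplitOn_eq_rec (seps seq : List String) :
    pvSplitOn seq seps = pvSplitRec seps seq := by
  unfold pvSplitOn
  have := pvSplitOn_fold seps seq [] []
  simp only [List.nil_append] at this
  rw [this]
  cases h : pvSplitRec seps seq with
  | nil => exact absurd h (pvSplitRec_ne_nil seps seq)
  | cons a t => simp [pvGlueS]

-- recursive reference version of B's whole computation
def pvParse (separator separator_of_groups : List String) (args : List String) : List (List (List Int)) :=
  (pvSplitRec separator_of_groups args).map
    (fun seg => (pvSplitRec separator seg).map (fun leaf => leaf.map pvToInt))

lemma pvParse_ne_nil (sep gsep args) : pvParse sep gsep args ≠ [] := by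
  unfold pvParse
  intro h
  exact pvSplitRec_ne_nil gsep args (List.map_eq_nil_iff.mp h)

-- glue the in-progress group onto the head of the parsed rest
def pvGlue2 (group : List (List Int)) : List (List Int) → List (List Int)
  | [] => group
  | s :: ss => group.dropLast ++ (group.getLastD [] ++ s) :: ss

def pvGlueG (group : List (List Int)) : List (List (List Int)) → List (List (List Int))
  | [] => [group]
  | g :: gs => pvGlue2 group g :: gs

lemma pvHeadGroup_ne_nil (sep : List String) (seg : List String) :
    (pvSplitRec sep seg).map (fun leaf => leaf.map pvToInt) ≠ [] := by
  intro h
  exact pvSplitRec_ne_nil sep seg (List.map_eq_nil_iff.mp h)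

lemma pvDropLastGetLastD {α : Type} (l : List α) : ∀ (r : List α) (d : α), l ≠ [] →
    l.dropLast ++ (l.getLastD d) :: r = l ++ r := by
  induction l with
  | nil => intro r d h; exact absurd rfl h
  | cons a t ih =>
    intro r d h
    cases t with
    | nil => simp
    | cons b u =>
      rw [List.dropLast_cons₂, List.getLastD_cons, List.cons_append, ih r a (by simp)]
      simp

lemma pvGlue2_nilfirst (group : List (List Int)) (ss : List (List Int)) (hg : group ≠ []) :
    pvGlue2 group ([] :: ss) = group ++ ss := by
  simp only [pvGlue2, List.append_nil]
  exact pvDropLastGetLastD group ss [] hg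

lemma pvGlue2_single_nil (group : List (List Int)) (hg : group ≠ []) :
    pvGlue2 group [[]] = group := by
  have h := pvGlue2_nilfirst group [] hg
  simpa using h

lemma pvMainFold (sep gsep : List String) (args : List String) :
    ∀ (acc : List (List (List Int))) (group : List (List Int)), group ≠ [] →
      (args.foldl (pvStepA sep gsep) (acc, group)).1
        ++ [(args.foldl (pvStepA sep gsep) (acc, group)).2]
      = acc ++ pvGlueG group (pvParse sep gsep args) := by
  induction args with
  | nil =>
    intro acc group hg
    simp only [List.foldl_nil]
    unfold pvParse
    simp only [pvSplitRec, List.map_cons, List.map_nil, pvGlueG]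
    rw [pvGlue2_single_nil group hg]
  | cons x xs ih =>
    intro acc group hg
    simp only [List.foldl_cons, pvStepA]
    by_cases hx1 : x ∈ gsep
    · simp only [hx1, if_pos]
      rw [ih (acc ++ [group]) [[]] (by simp)]
      unfold pvParse
      simp only [pvSplitRec, hx1, if_pos, List.map_cons]
      cases hp : (pvSplitRec gsep xs).map
          (fun seg => (pvSplitRec sep seg).map (fun leaf => leaf.map pvToInt)) with
      | nil =>
        exact absurd (List.map_eq_nil_iff.mp hp) (pvSplitRec_ne_nil gsep xs)
      | cons g gs =>
        have hgne : g ≠ [] := by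
          rcases List.map_eq_cons_iff.mp hp with ⟨seg, rest, _, hgeq, _⟩
          rw [← hgeq]; exact pvHeadGroup_ne_nil sep seg
        cases g with
        | nil => exact absurd rfl hgne
        | cons s ss =>
          simp only [pvGlueG, List.map_nil]
          rw [pvGlue2_single_nil group hg]
          simp [pvGlue2]
    · by_cases hx2 : x ∈ sep
      · simp only [hx1, hx2, if_pos, if_neg, not_false_iff]
        rw [ih acc (group ++ [[]]) (by simp)]
        unfold pvParse
        simp only [pvSplitRec, hx1, if_neg, not_false_iff]
        cases hq : pvSplitRec gsep xs with
        | nil => exact absurd hq (pvSplitRec_ne_nil gsep xs)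
        | cons h t =>
          simp only [pvConsHead, List.map_cons]
          cases hf : (pvSplitRec sep h).map (fun leaf => leaf.map pvToInt) with
          | nil => exact absurd (List.map_eq_nil_iff.mp hf) (pvSplitRec_ne_nil sep h)
          | cons s0 ss0 =>
            simp only [pvSplitRec, hx2, if_pos, List.map_cons, hf, pvGlueG, pvGlue2]
            rw [List.dropLast_concat, List.getLastD_concat]
            simp only [List.map_nil, List.append_nil, List.nil_append]
            rw [pvDropLastGetLastD group (s0 :: ss0) [] hg]
      · simp only [hx1, hx2, if_neg, not_false_iff]
        have hg' : group.dropLast ++ [group.getLastD [] ++ [pvToInt x]] ≠ [] := by simp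
        rw [ih acc _ hg']
        unfold pvParse
        simp only [pvSplitRec, hx1, if_neg, not_false_iff]
        cases hq : pvSplitRec gsep xs with
        | nil => exact absurd hq (pvSplitRec_ne_nil gsep xs)
        | cons h t =>
          simp only [pvConsHead, List.map_cons]
          cases hh : pvSplitRec sep h with
          | nil => exact absurd hh (pvSplitRec_ne_nil sep h)
          | cons h2 t2 =>
            simp only [pvSplitRec, hx2, if_neg, not_false_iff, hh, pvConsHead,
              List.map_cons, pvGlueG, pvGlue2]
            rw [List.dropLast_concat, List.getLastD_concat]
            simp

-- ===== VERDICT (by name: the statement is the Claim_ definition above) =====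
theorem process_CLI_arguments_spec : Claim_equal_process_CLI_arguments := by
  intro arguments separator separator_of_groups _ _
  unfold Spec_process_CLI_arguments process_CLI_arguments process_CLI_arguments_alt
  rw [pvSplitOn_eq_rec]
  have h := pvMainFold separator separator_of_groups arguments [] [[]] (by simp)
  simp only [List.nil_append] at h
  rw [h]
  cases hp : pvParse separator separator_of_groups arguments with
  | nil => exact absurd hp (pvParse_ne_nil _ _ _)
  | cons g gs =>
    have hgne : g ≠ [] := by
      unfold pvParse at hp
      rcases List.map_eq_cons_iff.mp hp with ⟨seg, rest, _, hgeq, _⟩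
      rw [← hgeq]; exact pvHeadGroup_ne_nil separator seg
    cases g with
    | nil => exact absurd rfl hgne
    | cons s ss =>
      have hsimp : pvGlue2 [[]] (s :: ss) = s :: ss := by simp [pvGlue2]
      simp only [pvGlueG, hsimp]
      rw [← hp]
      unfold pvParse
      congr 1
      funext seg
      rw [pvSplitOn_eq_rec]
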